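-- pv_equiv track=rewrite | github.com/Imfirn/PythonLab | Test1Basic/3.py | notsame
-- ===== SOURCE A (Python) =====
-- def notsame(x):
--     s=[]
--     for i in x:
--         if i == x:
--             pass
--         else:
--             if i not in s:
--                 s.append(i)
--     return sorted(s)
-- ===== SOURCE B (Python) =====
-- def notsame(x):
--     out = []
--     for v in sorted(x):
--         if not out or v != out[-1]:
--             out.append(v)
--     return out
-- ===== Notes on version B (the rewrite author's own statement) =====
-- stated objective: faster
-- what changed: B sorts first and deduplicates by comparing adjacent elements in one linear pass, replacing A's quadratic membership scan (i not in s) before sorting.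
import Mathlib
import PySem

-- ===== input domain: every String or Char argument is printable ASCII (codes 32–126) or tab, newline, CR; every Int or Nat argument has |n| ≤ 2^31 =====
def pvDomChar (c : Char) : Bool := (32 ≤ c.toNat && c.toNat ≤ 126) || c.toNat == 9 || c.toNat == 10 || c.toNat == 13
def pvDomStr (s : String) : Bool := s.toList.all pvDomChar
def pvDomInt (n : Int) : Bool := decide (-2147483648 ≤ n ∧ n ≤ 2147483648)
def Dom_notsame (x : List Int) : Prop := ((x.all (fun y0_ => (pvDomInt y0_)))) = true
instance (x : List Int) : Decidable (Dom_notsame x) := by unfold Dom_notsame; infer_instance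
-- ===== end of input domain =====

-- B sorts first and deduplicates by an adjacent-comparison linear pass, replacing A's quadratic membership scan before sorting.


-- ===== PORT A =====
-- Python's `i == x` compares an int with the whole list: always False in Python; ported literally as this helper
def pyEqIntList (_i : Int) (_x : List Int) : Bool := false

def notsame (x : List Int) : List Int :=
  PySem.List.sorted
    (x.foldl (fun s i =>
      if pyEqIntList i x then s
      else if i ∉ s then s ++ [i] else s) [])
    (fun v => v) false

-- ===== PORT B =====
def notsame_alt (x : List Int) : List Int :=
  (PySem.List.sorted x (fun v => v) false).foldl
    (fun out v => if out = [] ∨ out.getLast? ≠ some v then out ++ [v] else out) []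

-- ===== PRECONDITION & SPEC =====
def Spec_notsame (x : List Int) (out : List Int) : Prop := out = notsame_alt x
instance (x : List Int) (out : List Int) : Decidable (Spec_notsame x out) := by unfold Spec_notsame; infer_instance

-- ===== CLAIM (what is proved, stated in full; the proofs are below) =====
def Claim_equal_notsame : Prop := ∀ (x : List Int), Dom_notsame x → Spec_notsame x (notsame x)

-- ===== LEMMAS AND PROOFS =====

-- every element of a strictly increasing list is ≤ its last element
theorem le_getLast_of_pairwise_lt : ∀ (acc : List Int) (m : Int),
    acc.Pairwise (· < ·) → acc.getLast? = some m → ∀ a ∈ acc, a ≤ m := by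
  intro acc
  induction acc with
  | nil => intro m _ hm; simp at hm
  | cons h t ih =>
    intro m hp hm a ha
    cases t with
    | nil =>
      simp at hm
      rcases List.mem_cons.1 ha with rfl | h'
      · omega
      · cases h'
    | cons h2 t2 =>
      rw [List.getLast?_cons_cons] at hm
      have ih' := ih m (List.pairwise_cons.1 hp).2 hm
      rcases List.mem_cons.1 ha with rfl | ha'
      · have hlt : a < h2 := (List.pairwise_cons.1 hp).1 h2 List.mem_cons_self
        have := ih' h2 List.mem_cons_self
        omega
      · exact ih' a ha'

-- invariant of A's accumulation loop: nodup, and membership = acc ∪ input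
theorem foldA_inv (x : List Int) : ∀ (l acc : List Int), acc.Nodup →
    (l.foldl (fun s i => if pyEqIntList i x then s
      else if i ∉ s then s ++ [i] else s) acc).Nodup ∧
    (∀ a, a ∈ l.foldl (fun s i => if pyEqIntList i x then s
      else if i ∉ s then s ++ [i] else s) acc ↔ a ∈ acc ∨ a ∈ l) := by
  intro l
  induction l with
  | nil => intro acc hacc; exact ⟨hacc, by simp⟩
  | cons v rest ih =>
    intro acc hacc
    simp only [List.foldl_cons]
    rw [if_neg (by simp [pyEqIntList])]
    by_cases hv : v ∈ acc
    · rw [if_neg (not_not_intro hv)]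
      obtain ⟨h1, h2⟩ := ih acc hacc
      refine ⟨h1, fun a => ?_⟩
      rw [h2]
      constructor
      · rintro (h | h) <;> simp [h]
      · rintro (h | h)
        · exact Or.inl h
        · rcases List.mem_cons.1 h with rfl | h'
          · exact Or.inl hv
          · exact Or.inr h'
    · rw [if_pos hv]
      obtain ⟨h1, h2⟩ := ih (acc ++ [v]) (by simp [List.nodup_append, hacc]; intro a ha hav; exact hv (hav ▸ ha))
      refine ⟨h1, fun a => ?_⟩
      rw [h2]
      simp [List.mem_append, or_assoc]

-- invariant of B's adjacent-dedup loop: strictly increasing, membership = acc ∪ input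
theorem foldB_inv : ∀ (l acc : List Int), acc.Pairwise (· < ·) → l.Pairwise (· ≤ ·) →
    (∀ a ∈ acc, ∀ b ∈ l, a ≤ b) →
    (l.foldl (fun out v => if out = [] ∨ out.getLast? ≠ some v then out ++ [v] else out) acc).Pairwise (· < ·) ∧
    (∀ a, a ∈ l.foldl (fun out v => if out = [] ∨ out.getLast? ≠ some v then out ++ [v] else out) acc ↔ a ∈ acc ∨ a ∈ l) := by
  intro l
  induction l with
  | nil => intro acc hacc _ _; exact ⟨hacc, by simp⟩
  | cons v rest ih =>
    intro acc hacc hl hcross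
    have hl' := (List.pairwise_cons.1 hl).2
    have hvrest : ∀ b ∈ rest, v ≤ b := (List.pairwise_cons.1 hl).1
    simp only [List.foldl_cons]
    by_cases hc : acc = [] ∨ acc.getLast? ≠ some v
    · rw [if_pos hc]
      have hlt : ∀ a ∈ acc, a < v := by
        intro a ha
        rcases hc with rfl | hne
        · cases ha
        · have hne' : acc ≠ [] := by rintro rfl; cases ha
          obtain ⟨m, hm⟩ := Option.isSome_iff_exists.1 (List.getLast?_isSome.2 hne')
          have ham : a ≤ m := le_getLast_of_pairwise_lt acc m hacc hm a ha
          have hmv : m ≤ v := hcross m (List.mem_of_getLast? hm) v List.mem_cons_self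
          have : m ≠ v := fun h => hne (h ▸ hm)
          omega
      have hacc' : (acc ++ [v]).Pairwise (· < ·) := by
        rw [List.pairwise_append]
        exact ⟨hacc, by simp, by simpa using hlt⟩
      have hcross' : ∀ a ∈ acc ++ [v], ∀ b ∈ rest, a ≤ b := by
        intro a ha b hb
        rcases List.mem_append.1 ha with h | h
        · exact hcross a h b (List.mem_cons_of_mem _ hb)
        · simp at h; subst h; exact hvrest b hb
      obtain ⟨h1, h2⟩ := ih (acc ++ [v]) hacc' hl' hcross'
      refine ⟨h1, fun a => ?_⟩
      rw [h2]
      simp [List.mem_append, or_assoc]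
    · rw [if_neg hc]
      have hlast : acc.getLast? = some v := not_not.1 fun h => hc (Or.inr h)
      have hvmem : v ∈ acc := List.mem_of_getLast? hlast
      have hcross' : ∀ a ∈ acc, ∀ b ∈ rest, a ≤ b := by
        intro a ha b hb; exact hcross a ha b (List.mem_cons_of_mem _ hb)
      obtain ⟨h1, h2⟩ := ih acc hacc hl' hcross'
      refine ⟨h1, fun a => ?_⟩
      rw [h2]
      constructor
      · rintro (h | h) <;> simp [h]
      · rintro (h | h)
        · exact Or.inl h
        · rcases List.mem_cons.1 h with rfl | h'
          · exact Or.inl hvmem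
          · exact Or.inr h'

-- ===== VERDICT (by name: the statement is the Claim_ definition above) =====
theorem notsame_spec : Claim_equal_notsame := by
  intro x _
  unfold Spec_notsame notsame notsame_alt
  set sA := x.foldl (fun s i => if pyEqIntList i x then s
    else if i ∉ s then s ++ [i] else s) [] with hsA
  set sx := PySem.List.sorted x (fun v => v) false with hsx
  set rB := sx.foldl (fun out v => if out = [] ∨ out.getLast? ≠ some v then out ++ [v] else out) [] with hrB
  obtain ⟨hAnd, hAmem⟩ := foldA_inv x x [] List.nodup_nil
  have hsxpw : sx.Pairwise (· ≤ ·) := PySem.List.sorted_pairwise x (fun v => v)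
  obtain ⟨hBpw, hBmem⟩ := foldB_inv sx [] List.Pairwise.nil hsxpw (by simp)
  have hperm : rB.Perm sA := by
    rw [List.perm_ext_iff_of_nodup hBpw.nodup hAnd]
    intro a
    rw [hBmem a, hAmem a, PySem.List.mem_sorted x (fun v => v) false a]
  exact PySem.List.sorted_eq_of_perm_of_pairwise_lt sA rB (fun v => v) hperm hBpw
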